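-- pv_equiv track=rewrite | github.com/The1AbyS/MangaOCR-App | app/ui/textexportpanel.py | sort_frames_manga_style
-- ===== SOURCE A (Python) =====
-- def sort_frames_manga_style(frames, overlap_threshold=5):
--     def is_same_row(f, row):
--         for r in row:
--             top1, bottom1 = f[1], f[1] + f[3]
--             top2, bottom2 = r[1], r[1] + r[3]
--             overlap = min(bottom1, bottom2) - max(top1, top2)
--             if overlap >= -overlap_threshold:
--                 return True
--         return False
--
--     frames = sorted(frames, key=lambda f: f[1])
--     rows = []
--     for f in frames:
--         placed = False
--         for row in rows:
--             if is_same_row(f, row):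
--                 row.append(f)
--                 placed = True
--                 break
--         if not placed:
--             rows.append([f])
--
--     rows.sort(key=lambda row: min(f[1] for f in row))
--
--     sorted_result = []
--     for row in rows:
--         row_sorted = sorted(row, key=lambda f: -f[0])
--         sorted_result.extend(row_sorted)
--
--     return sorted_result
-- ===== SOURCE B (Python) =====
-- def sort_frames_manga_style(frames, overlap_threshold=5):
--     # rows: [members, max_bottom]; since frames are processed in increasing-top
--     # order, the per-member overlap test reduces to one comparison against the
--     # row's cached maximum bottom, and rows are created already ordered by
--     # their first (= lowest) top, so no final row sort is needed.
--     rows = []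
--     for f in sorted(frames, key=lambda f: f[1]):
--         bottom = f[1] + f[3]
--         for row in rows:
--             if min(bottom, row[1]) - f[1] >= -overlap_threshold:
--                 row[0].append(f)
--                 row[1] = max(row[1], bottom)
--                 break
--         else:
--             rows.append([[f], bottom])
--     result = []
--     for members, _ in rows:
--         result.extend(sorted(members, key=lambda f: -f[0]))
--     return result
-- ===== Notes on version B (the rewrite author's own statement) =====
-- stated objective: alternative
-- what changed: Rows cache a single max-bottom value so the per-member is_same_row scan becomes one comparison per row, and the final rows.sort is dropped because rows are created already ordered by their lowest top.
import Mathlib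
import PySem

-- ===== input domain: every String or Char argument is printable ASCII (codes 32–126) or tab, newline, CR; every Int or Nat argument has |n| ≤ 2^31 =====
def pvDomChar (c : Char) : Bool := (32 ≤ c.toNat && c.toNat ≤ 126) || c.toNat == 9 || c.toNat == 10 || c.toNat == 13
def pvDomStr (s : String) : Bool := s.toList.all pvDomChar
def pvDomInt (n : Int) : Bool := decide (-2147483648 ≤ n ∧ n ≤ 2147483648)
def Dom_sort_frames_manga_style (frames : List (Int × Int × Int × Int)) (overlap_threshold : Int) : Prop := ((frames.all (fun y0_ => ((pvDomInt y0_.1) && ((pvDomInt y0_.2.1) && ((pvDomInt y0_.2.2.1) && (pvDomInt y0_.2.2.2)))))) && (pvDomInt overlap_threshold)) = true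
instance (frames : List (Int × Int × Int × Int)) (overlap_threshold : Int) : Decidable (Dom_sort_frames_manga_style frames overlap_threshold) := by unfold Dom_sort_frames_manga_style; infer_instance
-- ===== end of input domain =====

-- B replaces A's per-member overlap scan by one cached max-bottom per row and drops
-- the redundant final row sort (rows are created already ordered by lowest top);
-- equal return value proved on all inputs (objective: simpler/faster inner loop).

-- ===== PORT A =====
-- is_same_row: early-return loop over the row's members
def isSameRowA (thr : Int) (f : Int × Int × Int × Int) : List (Int × Int × Int × Int) → Bool
  | [] => false
  | r :: rest =>
      if min (f.2.1 + f.2.2.2) (r.2.1 + r.2.2.2) - max f.2.1 r.2.1 ≥ -thr then true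
      else isSameRowA thr f rest

-- body of the placement loop: scan rows, append to the first matching row, else new row
def placeA (thr : Int) (f : Int × Int × Int × Int) :
    List (List (Int × Int × Int × Int)) → List (List (Int × Int × Int × Int))
  | [] => [[f]]
  | row :: rest =>
      if isSameRowA thr f row then (row ++ [f]) :: rest
      else row :: placeA thr f rest

-- min(f[1] for f in row); rows are never empty when this is called, 0 is an unreachable default
def rowMinA (row : List (Int × Int × Int × Int)) : Int :=
  (PySem.List.min? (row.map (fun f => f.2.1)) (fun x => x)).getD 0

def sort_frames_manga_style (frames : List (Int × Int × Int × Int)) (overlap_threshold : Int) :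
    List (Int × Int × Int × Int) :=
  let fs := PySem.List.sorted frames (fun f => f.2.1) false
  let rows := fs.foldl (fun rows f => placeA overlap_threshold f rows) []
  let rows := PySem.List.sorted rows rowMinA false
  rows.foldl (fun acc row => acc ++ PySem.List.sorted row (fun f => -f.1) false) []

-- ===== PORT B =====
-- rows carry (members, cached max bottom); first matching row wins, else a new row at the end
def placeB (thr : Int) (f : Int × Int × Int × Int) :
    List (List (Int × Int × Int × Int) × Int) → List (List (Int × Int × Int × Int) × Int)
  | [] => [([f], f.2.1 + f.2.2.2)]
  | (mem, mb) :: rest =>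
      if min (f.2.1 + f.2.2.2) mb - f.2.1 ≥ -thr then
        (mem ++ [f], max mb (f.2.1 + f.2.2.2)) :: rest
      else (mem, mb) :: placeB thr f rest

def sort_frames_manga_style_alt (frames : List (Int × Int × Int × Int)) (overlap_threshold : Int) :
    List (Int × Int × Int × Int) :=
  let fs := PySem.List.sorted frames (fun f => f.2.1) false
  let rows := fs.foldl (fun rows f => placeB overlap_threshold f rows) []
  rows.foldl (fun acc p => acc ++ PySem.List.sorted p.1 (fun f => -f.1) false) []

-- ===== PRECONDITION & SPEC =====
def Spec_sort_frames_manga_style (frames : List (Int × Int × Int × Int)) (overlap_threshold : Int) (out : List (Int × Int × Int × Int)) : Prop := out = sort_frames_manga_style_alt frames overlap_threshold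
instance (frames : List (Int × Int × Int × Int)) (overlap_threshold : Int) (out : List (Int × Int × Int × Int)) : Decidable (Spec_sort_frames_manga_style frames overlap_threshold out) := by unfold Spec_sort_frames_manga_style; infer_instance

-- ===== CLAIM (what is proved, stated in full; the proofs are below) =====
def Claim_equal_sort_frames_manga_style : Prop := ∀ (frames : List (Int × Int × Int × Int)) (overlap_threshold : Int), Dom_sort_frames_manga_style frames overlap_threshold → Spec_sort_frames_manga_style frames overlap_threshold (sort_frames_manga_style frames overlap_threshold)

-- ===== LEMMAS AND PROOFS =====

-- max bottom of a row, as B maintains it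
def mB : List (Int × Int × Int × Int) → Int
  | [] => 0
  | [r] => r.2.1 + r.2.2.2
  | r :: rest => max (r.2.1 + r.2.2.2) (mB rest)

-- top of the first frame of a row
def headTop : List (Int × Int × Int × Int) → Int
  | [] => 0
  | r :: _ => r.2.1

theorem mB_append (row : List (Int × Int × Int × Int)) (f : Int × Int × Int × Int)
    (h : row ≠ []) : mB (row ++ [f]) = max (mB row) (f.2.1 + f.2.2.2) := by
  induction row with
  | nil => exact absurd rfl h
  | cons r rest ih =>
      cases rest with
      | nil => simp [mB]
      | cons r2 rest2 =>
          have := ih (by simp)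
          simp only [List.cons_append, mB] at *
          rw [this, max_assoc]

theorem isSameRowA_iff (thr : Int) (f : Int × Int × Int × Int)
    (row : List (Int × Int × Int × Int)) (hne : row ≠ [])
    (hle : ∀ r ∈ row, r.2.1 ≤ f.2.1) :
    isSameRowA thr f row = true ↔ min (f.2.1 + f.2.2.2) (mB row) - f.2.1 ≥ -thr := by
  induction row with
  | nil => exact absurd rfl hne
  | cons r rest ih =>
      have hr : r.2.1 ≤ f.2.1 := hle r (by simp)
      cases rest with
      | nil =>
          simp only [isSameRowA, mB]
          constructor
          · intro h
            split at h
            · omega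
            · simp at h
          · intro h
            rw [if_pos (by omega)]
      | cons r2 rest2 =>
          have ihr := ih (by simp) (fun x hx => hle x (by simp [hx]))
          simp only [isSameRowA, mB]
          constructor
          · intro h
            split at h
            · omega
            · have := ihr.mp h
              omega
          · intro h
            by_cases hc : min (f.2.1 + f.2.2.2) (r.2.1 + r.2.2.2) - max f.2.1 r.2.1 ≥ -thr
            · rw [if_pos hc]
            · rw [if_neg hc]
              exact ihr.mpr (by omega)

def encR (row : List (Int × Int × Int × Int)) : List (Int × Int × Int × Int) × Int := (row, mB row)

-- one placement step: B's state mirrors A's rows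
theorem place_sim (thr : Int) (f : Int × Int × Int × Int) :
    ∀ rows : List (List (Int × Int × Int × Int)),
    (∀ row ∈ rows, row ≠ []) →
    (∀ row ∈ rows, ∀ r ∈ row, r.2.1 ≤ f.2.1) →
    placeB thr f (rows.map encR) = (placeA thr f rows).map encR := by
  intro rows
  induction rows with
  | nil => intro _ _; simp [placeA, placeB, encR, mB]
  | cons row rest ih =>
      intro hne hle
      have hrne : row ≠ [] := hne row (by simp)
      have hrle : ∀ r ∈ row, r.2.1 ≤ f.2.1 := hle row (by simp)
      simp only [List.map_cons, placeB, placeA, encR]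
      by_cases hc : isSameRowA thr f row = true
      · rw [if_pos ((isSameRowA_iff thr f row hrne hrle).mp hc), if_pos hc]
        simp only [List.map_cons, encR]
        rw [mB_append row f hrne]
      · rw [if_neg (fun h => hc ((isSameRowA_iff thr f row hrne hrle).mpr h)), if_neg hc]
        simp only [List.map_cons, encR]
        rw [ih (fun x hx => hne x (by simp [hx])) (fun x hx => hle x (by simp [hx]))]

-- structural effect of one A-step: a new last row [f], or f appended to one row
theorem placeA_cases (thr : Int) (f : Int × Int × Int × Int) :
    ∀ rows : List (List (Int × Int × Int × Int)),
    placeA thr f rows = rows ++ [[f]] ∨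
    ∃ pre row suf, rows = pre ++ row :: suf ∧
      placeA thr f rows = pre ++ (row ++ [f]) :: suf := by
  intro rows
  induction rows with
  | nil => left; rfl
  | cons row rest ih =>
      by_cases hc : isSameRowA thr f row = true
      · right; exact ⟨[], row, rest, by simp, by simp [placeA, hc]⟩
      · rcases ih with h | ⟨pre, row', suf, h1, h2⟩
        · left; simp [placeA, hc, h]
        · right; exact ⟨row :: pre, row', suf, by simp [h1], by simp [placeA, hc, h2]⟩

theorem headTop_append (row : List (Int × Int × Int × Int)) (f : Int × Int × Int × Int)
    (h : row ≠ []) : headTop (row ++ [f]) = headTop row := by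
  cases row with
  | nil => exact absurd rfl h
  | cons r rest => rfl

-- invariant carried through the fold
def PlaceInv (fs : List (Int × Int × Int × Int)) (rows : List (List (Int × Int × Int × Int))) : Prop :=
  (∀ row ∈ rows, row ≠ []) ∧
  (∀ row ∈ rows, ∀ r ∈ row, ∀ g ∈ fs, r.2.1 ≤ g.2.1) ∧
  (∀ row ∈ rows, ∀ r ∈ row, headTop row ≤ r.2.1) ∧
  rows.Pairwise (fun a b => headTop a ≤ headTop b)

theorem mem_of_mem_placeA (thr : Int) (f : Int × Int × Int × Int)
    (rows : List (List (Int × Int × Int × Int))) (row' : List (Int × Int × Int × Int))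
    (h : row' ∈ placeA thr f rows) :
    row' = [f] ∨ row' ∈ rows ∨ ∃ row ∈ rows, row' = row ++ [f] := by
  rcases placeA_cases thr f rows with hc | ⟨pre, row, suf, h1, h2⟩
  · rw [hc] at h
    rcases List.mem_append.mp h with h | h
    · right; left; exact h
    · left; simpa using h
  · rw [h2] at h
    rcases List.mem_append.mp h with h | h
    · right; left; rw [h1]; exact List.mem_append.mpr (Or.inl h)
    · rcases List.mem_cons.mp h with h | h
      · right; right; exact ⟨row, by rw [h1]; simp, h⟩
      · right; left; rw [h1]; simp [h]

theorem inv_step (thr : Int) (f : Int × Int × Int × Int) (fs : List (Int × Int × Int × Int))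
    (rows : List (List (Int × Int × Int × Int)))
    (hf : ∀ g ∈ fs, f.2.1 ≤ g.2.1) (hInv : PlaceInv (f :: fs) rows) :
    PlaceInv fs (placeA thr f rows) := by
  obtain ⟨h1, h2, h3, h4⟩ := hInv
  have hftop : ∀ row ∈ rows, ∀ r ∈ row, r.2.1 ≤ f.2.1 :=
    fun row hrow r hr => h2 row hrow r hr f (by simp)
  refine ⟨?_, ?_, ?_, ?_⟩
  · intro row' h
    rcases mem_of_mem_placeA thr f rows row' h with h | h | ⟨row, hrow, h⟩
    · simp [h]
    · exact h1 row' h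
    · subst h; simp
  · intro row' h r hr g hg
    rcases mem_of_mem_placeA thr f rows row' h with h | h | ⟨row, hrow, h⟩
    · subst h; simp at hr; subst hr; exact hf g hg
    · exact h2 row' h r hr g (by simp [hg])
    · subst h
      rcases List.mem_append.mp hr with hr | hr
      · exact h2 row hrow r hr g (by simp [hg])
      · simp at hr; subst hr; exact hf g hg
  · intro row' h r hr
    rcases mem_of_mem_placeA thr f rows row' h with h | h | ⟨row, hrow, h⟩
    · subst h; simp at hr; subst hr; simp [headTop]
    · exact h3 row' h r hr
    · subst h
      rw [headTop_append row f (h1 row hrow)]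
      rcases List.mem_append.mp hr with hr | hr
      · exact h3 row hrow r hr
      · simp at hr; subst hr
        cases row with
        | nil => exact absurd rfl (h1 _ hrow)
        | cons r0 rest => exact hftop _ hrow r0 (by simp)
  · rcases placeA_cases thr f rows with hc | ⟨pre, row, suf, hEq, hc⟩
    · rw [hc]
      apply List.pairwise_append.mpr
      refine ⟨h4, by simp, ?_⟩
      intro a ha b hb
      simp at hb; subst hb
      cases a with
      | nil => exact absurd rfl (h1 _ ha)
      | cons a0 arest =>
          have := hftop _ ha a0 (by simp)
          simpa [headTop] using this
    · rw [hc]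
      have hmap : (pre ++ (row ++ [f]) :: suf).map headTop = rows.map headTop := by
        rw [hEq]
        simp only [List.map_append, List.map_cons]
        rw [headTop_append row f (h1 row (by rw [hEq]; simp))]
      have h4' : (rows.map headTop).Pairwise (· ≤ ·) := List.pairwise_map.mpr h4
      rw [← hmap] at h4'
      exact List.pairwise_map.mp h4'

-- the whole fold: B's state = encoded A rows, and the final rows satisfy the invariant
theorem fold_sim (thr : Int) :
    ∀ (fs : List (Int × Int × Int × Int)) (rows : List (List (Int × Int × Int × Int))),
    fs.Pairwise (fun a b => a.2.1 ≤ b.2.1) → PlaceInv fs rows →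
    fs.foldl (fun acc f => placeB thr f acc) (rows.map encR) =
      (fs.foldl (fun acc f => placeA thr f acc) rows).map encR ∧
    PlaceInv [] (fs.foldl (fun acc f => placeA thr f acc) rows) := by
  intro fs
  induction fs with
  | nil =>
      intro rows _ hInv
      obtain ⟨h1, _, h3, h4⟩ := hInv
      exact ⟨rfl, ⟨h1, by simp, h3, h4⟩⟩
  | cons f fs ih =>
      intro rows hpw hInv
      have hf : ∀ g ∈ fs, f.2.1 ≤ g.2.1 := (List.pairwise_cons.mp hpw).1
      have hstep := inv_step thr f fs rows hf hInv
      have hsim := place_sim thr f rows hInv.1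
        (fun row hrow r hr => hInv.2.1 row hrow r hr f (by simp))
      simp only [List.foldl_cons]
      rw [hsim]
      exact ih (placeA thr f rows) (List.pairwise_cons.mp hpw).2 hstep

theorem foldl_min_of_le (l : List Int) : ∀ x, (∀ y ∈ l, x ≤ y) → l.foldl min x = x := by
  induction l with
  | nil => intro x _; rfl
  | cons y t ih =>
      intro x h
      simp only [List.foldl_cons]
      rw [min_eq_left (h y (by simp))]
      exact ih x (fun z hz => h z (by simp [hz]))

theorem rowMinA_eq_headTop (row : List (Int × Int × Int × Int)) (hne : row ≠ [])
    (hmin : ∀ r ∈ row, headTop row ≤ r.2.1) : rowMinA row = headTop row := by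
  cases row with
  | nil => exact absurd rfl hne
  | cons r rest =>
      simp only [rowMinA, List.map_cons, PySem.List.min?_id_cons, Option.getD_some, headTop]
      exact foldl_min_of_le (rest.map (fun f => f.2.1)) r.2.1
        (by
          intro y hy
          rcases List.mem_map.mp hy with ⟨g, hg, rfl⟩
          exact hmin g (by simp [hg]))

-- ===== VERDICT (by name: the statement is the Claim_ definition above) =====
theorem sort_frames_manga_style_spec : Claim_equal_sort_frames_manga_style := by
  intro frames thr _
  show sort_frames_manga_style frames thr = sort_frames_manga_style_alt frames thr
  simp only [sort_frames_manga_style, sort_frames_manga_style_alt]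
  have hpw : (PySem.List.sorted frames (fun f => f.2.1) false).Pairwise
      (fun a b => a.2.1 ≤ b.2.1) := PySem.List.sorted_pairwise frames (fun f => f.2.1)
  have h := fold_sim thr (PySem.List.sorted frames (fun f => f.2.1) false) []
    hpw ⟨by simp, by simp, by simp, by simp⟩
  obtain ⟨hsim, h1, _, h3, h4⟩ := h
  set R := (PySem.List.sorted frames (fun f => f.2.1) false).foldl
    (fun acc f => placeA thr f acc) [] with hR
  simp only [List.map_nil] at hsim
  rw [hsim]
  have hsorted : PySem.List.sorted R rowMinA false = R := by
    apply PySem.List.sorted_eq_self_of_pairwise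
    have : R.Pairwise (fun a b => headTop a ≤ headTop b) := h4
    refine List.Pairwise.imp_of_mem ?_ this
    intro a b ha hb hab
    rw [rowMinA_eq_headTop a (h1 a ha) (h3 a ha), rowMinA_eq_headTop b (h1 b hb) (h3 b hb)]
    exact hab
  rw [hsorted, List.foldl_map]
  rfl
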